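-- pv_equiv track=rewrite | github.com/coaxk/maparr | backend/cross_stack.py | _role_names
-- ===== SOURCE A (Python) =====
-- def _role_names(roles: set) -> str:
--     """Convert role set to human-readable names."""
--     names = []
--     for role in sorted(roles):
--         if role == "arr":
--             names.append("*arr app")
--         elif role == "download_client":
--             names.append("download client")
--         elif role == "media_server":
--             names.append("media server")
--     return " or ".join(names)
-- ===== SOURCE B (Python) =====
-- _ROLE_TABLE = [
--     ("arr", "*arr app"),
--     ("download_client", "download client"),
--     ("media_server", "media server"),
-- ]
--
--
-- def _role_names(roles: set) -> str:
--     """Convert role set to human-readable names."""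
--     return " or ".join(name for key, name in _ROLE_TABLE if key in roles)
-- ===== Notes on version B (the rewrite author's own statement) =====
-- stated objective: faster
-- what changed: B drops the sort-then-classify loop and instead scans a fixed ordered table of the three known roles, selecting each display name by set membership and joining; the output order comes from the table (which matches sorted order of the keys) rather than from sorting the input.
import Mathlib
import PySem

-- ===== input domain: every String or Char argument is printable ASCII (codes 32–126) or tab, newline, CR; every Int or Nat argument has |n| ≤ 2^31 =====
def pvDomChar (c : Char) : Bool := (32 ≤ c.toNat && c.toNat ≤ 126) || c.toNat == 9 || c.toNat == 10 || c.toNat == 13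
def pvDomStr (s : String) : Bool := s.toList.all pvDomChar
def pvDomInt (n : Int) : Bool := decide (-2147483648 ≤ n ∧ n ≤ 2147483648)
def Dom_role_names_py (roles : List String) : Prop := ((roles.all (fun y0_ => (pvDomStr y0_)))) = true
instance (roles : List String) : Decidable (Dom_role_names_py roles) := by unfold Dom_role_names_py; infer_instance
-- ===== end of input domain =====

-- B replaces A's sort-then-classify loop by a scan of a fixed ordered table of known
-- roles filtered by set membership (idiomatic; same output on every set input).

-- ===== PORT A =====
def role_names_py (roles : List String) : String :=
  let names := (PySem.List.sorted roles (fun x => x) false).foldl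
    (fun names role =>
      if role = "arr" then names ++ ["*arr app"]
      else if role = "download_client" then names ++ ["download client"]
      else if role = "media_server" then names ++ ["media server"]
      else names) []
  PySem.Str.join " or " names

-- ===== PORT B =====
def roleTable : List (String × String) :=
  [("arr", "*arr app"), ("download_client", "download client"), ("media_server", "media server")]

def role_names_py_alt (roles : List String) : String :=
  PySem.Str.join " or " ((roleTable.filter (fun p => roles.contains p.1)).map Prod.snd)

-- ===== PRECONDITION & SPEC =====
-- 'roles' is a Python set; under the type convention its List String encoding holds
-- DISTINCT elements, so Pre_ requires exactly that (it excludes no actual set input).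
def Pre_role_names_py (roles : List String) : Prop := roles.Nodup
instance (roles : List String) : Decidable (Pre_role_names_py roles) := by unfold Pre_role_names_py; infer_instance
def pvWitness_role_names_py : List String := ["media_server", "arr", "other"]

def Spec_role_names_py (roles : List String) (out : String) : Prop := out = role_names_py_alt roles
instance (roles : List String) (out : String) : Decidable (Spec_role_names_py roles out) := by unfold Spec_role_names_py; infer_instance

-- ===== CLAIM (what is proved, stated in full; the proofs are below) =====
def Claim_equal_role_names_py : Prop := ∀ (roles : List String), Dom_role_names_py roles → Pre_role_names_py roles → Spec_role_names_py roles (role_names_py roles)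

-- ===== LEMMAS AND PROOFS =====

/-- A's if/elif classification, as an optional display name. -/
def pvClassify (r : String) : Option String :=
  if r = "arr" then some "*arr app"
  else if r = "download_client" then some "download client"
  else if r = "media_server" then some "media server"
  else none

lemma pv_foldl_eq_filterMap (l : List String) (acc : List String) :
    l.foldl (fun names role =>
      if role = "arr" then names ++ ["*arr app"]
      else if role = "download_client" then names ++ ["download client"]
      else if role = "media_server" then names ++ ["media server"]
      else names) acc = acc ++ l.filterMap pvClassify := by
  induction l generalizing acc with
  | nil => simp
  | cons x t ih =>
    simp only [List.foldl_cons, List.filterMap_cons, pvClassify]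
    split_ifs <;> simp [ih, pvClassify]

def pvKeys : List String := ["arr", "download_client", "media_server"]

lemma pv_filterMap_filter (l : List String) :
    l.filterMap pvClassify = (l.filter (fun r => r ∈ pvKeys)).filterMap pvClassify := by
  induction l with
  | nil => rfl
  | cons x t ih =>
    by_cases hx : x ∈ pvKeys
    · simp [hx, List.filterMap_cons, ih]
    · have hnone : pvClassify x = none := by
        simp [pvKeys] at hx
        simp [pvClassify, hx.1, hx.2.1, hx.2.2]
      simp [hx, hnone, ih]

/-- Two strictly increasing lists with the same members are equal. -/
lemma pv_eq_of_mem_iff {l₁ l₂ : List String}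
    (h₁ : l₁.Pairwise (· < ·)) (h₂ : l₂.Pairwise (· < ·))
    (hm : ∀ x, x ∈ l₁ ↔ x ∈ l₂) : l₁ = l₂ := by
  have n₁ : l₁.Nodup := h₁.imp ne_of_lt
  have n₂ : l₂.Nodup := h₂.imp ne_of_lt
  have hp : l₁.Perm l₂ := (List.perm_ext_iff_of_nodup n₁ n₂).mpr hm
  exact hp.eq_of_pairwise (fun a b _ _ h1 h2 => absurd h2 (not_lt.2 h1.le)) h₁ h₂

-- ===== VERDICT (by name: the statement is the Claim_ definition above) =====
theorem role_names_py_spec : Claim_equal_role_names_py := by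
  intro roles _ hnd
  unfold Spec_role_names_py role_names_py role_names_py_alt
  set S := PySem.List.sorted roles (fun x => x) false with hSdef
  have hsort : S.Pairwise (· < ·) := by
    have hle : S.Pairwise (fun a b => a ≤ b) := PySem.List.sorted_pairwise roles (fun x => x)
    have hnd' : S.Nodup := (PySem.List.sorted_perm roles (fun x => x) false).nodup_iff.mpr hnd
    exact List.Pairwise.imp₂ (fun a b hab hne => lt_of_le_of_ne hab hne) hle hnd'
  have hmemS : ∀ x, x ∈ S ↔ x ∈ roles := fun x => PySem.List.mem_sorted roles (fun x => x) false x
  rw [pv_foldl_eq_filterMap, List.nil_append, pv_filterMap_filter]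
  have hfilter : S.filter (fun r => r ∈ pvKeys) = pvKeys.filter (fun k => k ∈ S) := by
    apply pv_eq_of_mem_iff
    · exact hsort.filter _
    · have : pvKeys.Pairwise (· < ·) := by
        simp [pvKeys, String.lt_iff_toList_lt]; decide
      exact this.filter _
    · intro x
      simp only [List.mem_filter, decide_eq_true_eq]
      tauto
  rw [hfilter]
  by_cases ha : "arr" ∈ roles <;> by_cases hb : "download_client" ∈ roles <;>
    by_cases hc : "media_server" ∈ roles <;>
      simp [pvKeys, roleTable, List.filter, hmemS, ha, hb, hc, pvClassify,
        List.filterMap]
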